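-- pv_equiv track=rewrite | github.com/avi78/Accenture_practice | CountExponent.py | maxExponents
-- ===== SOURCE A (Python) =====
-- def maxExponents(a, b):
--     def countExponents(i):
--         count = 0
--         while i % 2 == 0 and i != 0:
--             count += 1
--             i //= 2
--         return count
--     return max(range(a, b + 1), key=countExponents)
-- ===== SOURCE B (Python) =====
-- def maxExponents(a, b):
--     # Walk powers of two: keep the least element of [a, b] whose 2-adic count is
--     # >= the current exponent; stop when no nonzero multiple of p remains in range.
--     if a > b:
--         raise ValueError("max() arg is an empty sequence")
--     def least_multiple(a, p):
--         m = -(-a // p) * p          # least multiple of p that is >= a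
--         return p if m == 0 else m   # least *nonzero* multiple of p that is >= a
--     best, p = a, 2
--     while True:
--         m = least_multiple(a, p)
--         if m > b:
--             return best
--         best = m
--         p *= 2
-- ===== Notes on version B (the rewrite author's own statement) =====
-- stated objective: faster
-- what changed: Instead of scanning every integer in [a,b] and counting each one's factors of two, B walks powers of two p = 2,4,8,... keeping the least nonzero multiple of p in [a,b], and returns the last one found when no multiple of the next power remains; intended as asymptotically faster.
import Mathlib
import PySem

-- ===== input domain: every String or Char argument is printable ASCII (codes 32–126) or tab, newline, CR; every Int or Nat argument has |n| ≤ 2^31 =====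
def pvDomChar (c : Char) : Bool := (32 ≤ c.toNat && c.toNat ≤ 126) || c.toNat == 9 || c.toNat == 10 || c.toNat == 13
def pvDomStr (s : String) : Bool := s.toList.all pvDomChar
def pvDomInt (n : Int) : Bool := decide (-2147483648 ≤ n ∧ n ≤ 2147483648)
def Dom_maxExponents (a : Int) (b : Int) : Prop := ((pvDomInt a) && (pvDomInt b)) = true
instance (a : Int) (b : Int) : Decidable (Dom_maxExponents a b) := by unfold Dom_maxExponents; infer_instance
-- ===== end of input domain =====

-- B replaces A's scan of every integer in [a,b] with a walk over powers of two; intended as asymptotically faster. Both programs raise ValueError on a > b (excluded by Pre_).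


-- ===== PORT A =====
-- countExponents(i): while i % 2 == 0 and i != 0: count += 1; i //= 2
def countExponents (i : Int) : Int :=
  if h : PySem.Int.mod i 2 = 0 ∧ i ≠ 0 then
    countExponents (PySem.Int.floordiv i 2) + 1
  else 0
termination_by i.natAbs
decreasing_by
  obtain ⟨h2, h0⟩ := h
  rw [PySem.Int.mod_eq_zero_iff_dvd] at h2
  obtain ⟨k, hk⟩ := h2
  rw [PySem.Int.floordiv_eq_ediv_of_pos (by norm_num), hk, Int.mul_ediv_cancel_left _ (by norm_num)]
  subst hk; omega

-- max(range(a, b + 1), key=countExponents); none = ValueError, excluded by Pre_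
def maxExponents (a : Int) (b : Int) : Int :=
  match PySem.List.max? (PySem.List.pyRange a (b + 1) 1) countExponents with
  | some m => m
  | none => 0

-- ===== PORT B =====
-- least_multiple(a, p): least nonzero multiple of p that is >= a
def leastMult (a p : Int) : Int :=
  let m := -(PySem.Int.floordiv (-a) p) * p
  if m = 0 then p else m

-- the four facts about leastMult (0 < p); stated above altLoop because its termination proof cites leastMult_bound
theorem leastMult_spec (a p : Int) (hp : 0 < p) :
    p ∣ leastMult a p ∧ leastMult a p ≠ 0 ∧ a ≤ leastMult a p ∧
      ∀ y, p ∣ y → y ≠ 0 → a ≤ y → leastMult a p ≤ y := by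
  have hpne : p ≠ 0 := by omega
  set q : Int := PySem.Int.floordiv (-a) p with hq
  have hqe : q = (-a) / p := by rw [hq, PySem.Int.floordiv_eq_ediv_of_pos hp]
  have hm0 : -q * p = -(q * p) := by ring
  have h1 : a ≤ -q * p := by
    have h := Int.ediv_mul_le (-a) hpne
    rw [← hqe] at h; omega
  have h2 : -q * p < a + p := by
    have h := Int.lt_ediv_add_one_mul_self (-a) hp
    rw [← hqe] at h
    have hx : (q + 1) * p = q * p + p := by ring
    omega
  have hlm : leastMult a p = if -q * p = 0 then p else -q * p := by
    simp only [leastMult, hq]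
  by_cases hz : -q * p = 0
  · rw [hlm, if_pos hz]
    refine ⟨dvd_refl p, by omega, by omega, ?_⟩
    rintro y ⟨c, hc⟩ hy0 hay
    have hc0 : c ≠ 0 := by rintro rfl; simp at hc; exact hy0 hc
    rcases lt_or_gt_of_ne hc0 with h | h
    · have : y ≤ -p := by calc y = p * c := hc
                            _ ≤ p * (-1) := by apply mul_le_mul_of_nonneg_left (by omega) (by omega)
                            _ = -p := by ring
      omega
    · have : p ≤ y := by calc p = p * 1 := by ring
                            _ ≤ p * c := by apply mul_le_mul_of_nonneg_left (by omega) (by omega)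
                            _ = y := hc.symm
      omega
  · rw [hlm, if_neg hz]
    refine ⟨⟨-q, by ring⟩, hz, h1, ?_⟩
    rintro y ⟨c, hc⟩ hy0 hay
    have e1 : p * (-q - 1) < p * c := by
      have e : p * (-q - 1) = -(q * p) - p := by ring
      omega
    have e2 : -q - 1 < c := lt_of_mul_lt_mul_left e1 (by omega)
    have e3 : p * (-q) ≤ p * c := by apply mul_le_mul_of_nonneg_left (by omega) (by omega)
    have e4 : p * (-q) = -(q * p) := by ring
    omega

-- cited by altLoop's decreasing_by: a surviving power p is bounded by max b (-a)
theorem leastMult_bound (a b p : Int) (hp : 0 < p) (hb : leastMult a p ≤ b) : p ≤ max b (-a) := by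
  obtain ⟨⟨c, hc⟩, hne, hge, -⟩ := leastMult_spec a p hp
  have hc0 : c ≠ 0 := by rintro rfl; simp at hc; exact hne hc
  rcases lt_or_gt_of_ne hc0 with h | h
  · have : leastMult a p ≤ -p := by
      calc leastMult a p = p * c := hc
        _ ≤ p * (-1) := by apply mul_le_mul_of_nonneg_left (by omega) (by omega)
        _ = -p := by ring
    have : p ≤ -a := by omega
    omega
  · have : p ≤ leastMult a p := by
      calc p = p * 1 := by ring
        _ ≤ p * c := by apply mul_le_mul_of_nonneg_left (by omega) (by omega)
        _ = leastMult a p := hc.symm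
    have : p ≤ b := by omega
    omega

-- the while loop of B, state (best, p); hp is only the termination invariant 2 ≤ p
def altLoop (a b best p : Int) (hp : 2 ≤ p) : Int :=
  if hm : leastMult a p > b then best
  else altLoop a b (leastMult a p) (p * 2) (by omega)
termination_by (2 * max b (-a) - p).toNat
decreasing_by
  have := leastMult_bound a b p (by omega) (by omega)
  omega

-- Source B raises ValueError on a > b (outside Pre_); the port returns 0 on that branch
def maxExponents_alt (a : Int) (b : Int) : Int :=
  if a > b then 0 else altLoop a b a 2 (by norm_num)

-- ===== PRECONDITION & SPEC =====
-- Pre_ excludes exactly a > b: there range(a, b+1) is empty and both A's max() and B raise ValueError.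
def Pre_maxExponents (a : Int) (b : Int) : Prop := a ≤ b
instance (a : Int) (b : Int) : Decidable (Pre_maxExponents a b) := by unfold Pre_maxExponents; infer_instance
def pvWitness_maxExponents : Int × Int := (0, 5)

def Spec_maxExponents (a : Int) (b : Int) (out : Int) : Prop := out = maxExponents_alt a b
instance (a : Int) (b : Int) (out : Int) : Decidable (Spec_maxExponents a b out) := by unfold Spec_maxExponents; infer_instance

-- ===== CLAIM (what is proved, stated in full; the proofs are below) =====
def Claim_equal_maxExponents : Prop := ∀ (a : Int) (b : Int), Dom_maxExponents a b → Pre_maxExponents a b → Spec_maxExponents a b (maxExponents a b)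

-- ===== LEMMAS AND PROOFS =====

theorem two_le_two_pow_succ (k : Nat) : 2 ≤ (2:Int)^(k+1) := by
  have h : (0:Int) < 2^k := by positivity
  rw [pow_succ]; nlinarith

theorem countExponents_nonneg (i : Int) : 0 ≤ countExponents i := by
  induction i using countExponents.induct with
  | case1 i h ih => rw [countExponents, dif_pos h]; omega
  | case2 i h => rw [countExponents, dif_neg h]

theorem countExponents_zero : countExponents 0 = 0 := by
  rw [countExponents]; simp

-- A's key is the exact 2-adic valuation: 2^n divides y, 2^(n+1) does not
theorem countExponents_exact (y : Int) (hy : y ≠ 0) :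
    ∃ n : Nat, countExponents y = (n : Int) ∧ ((2:Int)^n ∣ y) ∧ ¬ ((2:Int)^(n+1) ∣ y) := by
  induction y using countExponents.induct with
  | case1 y h ih =>
    obtain ⟨h2, h0⟩ := h
    rw [PySem.Int.mod_eq_zero_iff_dvd] at h2
    obtain ⟨k, hk⟩ := h2
    have hdiv : PySem.Int.floordiv y 2 = k := by
      rw [PySem.Int.floordiv_eq_ediv_of_pos (by norm_num), hk, Int.mul_ediv_cancel_left _ (by norm_num)]
    have hk0 : k ≠ 0 := by rintro rfl; simp at hk; exact h0 hk
    obtain ⟨n, hn, hd, hnd⟩ := ih (by rwa [hdiv])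
    rw [hdiv] at hn hd hnd
    refine ⟨n + 1, ?_, ?_, ?_⟩
    · rw [countExponents, dif_pos ⟨PySem.Int.mod_eq_zero_iff_dvd y 2 |>.mpr ⟨k, hk⟩, h0⟩, hdiv, hn]
      push_cast; ring
    · obtain ⟨c, hc⟩ := hd
      exact ⟨c, by rw [hk, hc, pow_succ]; ring⟩
    · rintro ⟨c, hc⟩
      apply hnd
      refine ⟨c, ?_⟩
      have e : y = 2 * (2^(n+1) * c) := by rw [hc]; ring
      omega
  | case2 y h =>
    rw [not_and_or] at h
    rcases h with h | h
    · rw [PySem.Int.mod_eq_zero_iff_dvd] at h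
      refine ⟨0, ?_, one_dvd y, ?_⟩
      · rw [countExponents]
        simp only [PySem.Int.mod_eq_zero_iff_dvd]
        rw [dif_neg (by tauto)]
        norm_num
      · simpa using h
    · exact absurd hy (by simpa using h)

-- for k ≥ 1: key y ≥ k  iff  y is a nonzero multiple of 2^k
theorem key_ge_iff (y : Int) (k : Nat) (hk : 1 ≤ k) :
    ((k : Int) ≤ countExponents y) ↔ (((2:Int)^k ∣ y) ∧ y ≠ 0) := by
  by_cases hy : y = 0
  · subst hy
    rw [countExponents_zero]
    exact ⟨fun h => absurd h (by omega), fun ⟨_, h⟩ => absurd rfl h⟩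
  · obtain ⟨n, hn, hd, hnd⟩ := countExponents_exact y hy
    rw [hn]
    constructor
    · intro h
      exact ⟨dvd_trans (pow_dvd_pow 2 (by omega : k ≤ n)) hd, hy⟩
    · rintro ⟨hdk, -⟩
      by_contra hlt
      exact hnd (dvd_trans (pow_dvd_pow 2 (by omega : n + 1 ≤ k)) hdk)

-- r is the first (least) element of [a,b] attaining the maximal key
def IsFirstMax (a b r : Int) : Prop :=
  a ≤ r ∧ r ≤ b ∧ (∀ y, a ≤ y → y ≤ b → countExponents y ≤ countExponents r) ∧
    (∀ y, a ≤ y → y < r → countExponents y < countExponents r)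

theorem isFirstMax_unique {a b r s : Int} (hr : IsFirstMax a b r) (hs : IsFirstMax a b s) : r = s := by
  obtain ⟨har, hrb, hrmax, hrfst⟩ := hr
  obtain ⟨has, hsb, hsmax, hsfst⟩ := hs
  rcases lt_trichotomy r s with h | h | h
  · exact absurd (hrmax s has hsb) (not_le.mpr (hsfst r har h))
  · exact h
  · exact absurd (hsmax r har hrb) (not_le.mpr (hrfst s has h))

-- ===== A side: max? over the sorted range returns the first argmax =====
theorem max?_pyRange_isFirstMax (a b : Int) (hab : a ≤ b) :
    ∃ r, PySem.List.max? (PySem.List.pyRange a (b + 1) 1) countExponents = some r ∧ IsFirstMax a b r := by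
  induction b, hab using Int.le_induction with
  | base =>
    have h1 : PySem.List.pyRange a (a + 1) 1 = [a] := by
      rw [PySem.List.pyRange_one_cons (by omega)]
      simp
    refine ⟨a, by simp [h1, PySem.List.max?], le_refl a, le_refl a, ?_, ?_⟩
    · intro y h1 h2
      have : y = a := by omega
      subst this; exact le_refl _
    · intro y h1 h2; omega
  | succ b hb ih =>
    obtain ⟨r, hr, har, hrb, hmax, hfst⟩ := ih
    have hsnoc : PySem.List.pyRange a (b + 1 + 1) 1 = PySem.List.pyRange a (b + 1) 1 ++ [b + 1] :=
      PySem.List.pyRange_one_succ_right (by omega)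
    have hstep : PySem.List.max? (PySem.List.pyRange a (b + 1 + 1) 1) countExponents =
        (if countExponents r < countExponents (b + 1) then some (b + 1) else some r) := by
      rw [hsnoc]
      simp only [PySem.List.max?, List.foldl_append] at hr ⊢
      rw [hr]
      simp
    by_cases hc : countExponents r < countExponents (b + 1)
    · refine ⟨b + 1, by rw [hstep, if_pos hc], by omega, le_refl _, ?_, ?_⟩
      · intro y h1 h2
        rcases eq_or_lt_of_le h2 with h | h
        · rw [h]
        · exact le_of_lt (lt_of_le_of_lt (hmax y h1 (by omega)) hc)
      · intro y h1 h2
        exact lt_of_le_of_lt (hmax y h1 (by omega)) hc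
    · refine ⟨r, by rw [hstep, if_neg hc], har, by omega, ?_, hfst⟩
      intro y h1 h2
      rcases eq_or_lt_of_le h2 with h | h
      · rw [h]; omega
      · exact hmax y h1 (by omega)

theorem A_isFirstMax (a b : Int) (hab : a ≤ b) : IsFirstMax a b (maxExponents a b) := by
  obtain ⟨r, hr, hfm⟩ := max?_pyRange_isFirstMax a b hab
  unfold maxExponents
  rw [hr]
  exact hfm

-- ===== B side: return branch — when no nonzero multiple of 2^(k+1) remains, best is the answer =====
theorem altLoop_ret (a b best p : Int) (k : Nat) (hpk : p = 2^(k+1)) (_hab : a ≤ b)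
    (hQ : a ≤ best ∧ best ≤ b ∧ (k : Int) ≤ countExponents best)
    (hleast : ∀ y, a ≤ y → y ≤ b → (k : Int) ≤ countExponents y → best ≤ y)
    (hret : leastMult a p > b) : IsFirstMax a b best := by
  refine ⟨hQ.1, hQ.2.1, ?_, ?_⟩
  · intro y h1 h2
    have hy : countExponents y ≤ (k : Int) := by
      by_contra hyk
      have hky : ((k + 1 : Nat) : Int) ≤ countExponents y := by push_cast; omega
      obtain ⟨hd, hy0⟩ := (key_ge_iff y (k + 1) (by omega)).mp hky
      obtain ⟨-, -, -, hlst⟩ := leastMult_spec a p (by rw [hpk]; have := two_le_two_pow_succ k; omega)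
      have := hlst y (by rwa [hpk]) hy0 h1
      omega
    omega
  · intro y h1 h2
    have hyb : y ≤ b := by omega
    have hnk : ¬ ((k : Int) ≤ countExponents y) := by
      intro h
      exact absurd (hleast y h1 hyb h) (by omega)
    omega

-- ===== B side: the loop invariant — best is the least element of [a,b] with key ≥ k =====
theorem altLoop_isFirstMax (n : Nat) :
    ∀ (a b best p : Int) (k : Nat) (hp : 2 ≤ p), p = 2^(k+1) →
      (2 * max b (-a) - p).toNat ≤ n → a ≤ b →
      (a ≤ best ∧ best ≤ b ∧ (k : Int) ≤ countExponents best) →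
      (∀ y, a ≤ y → y ≤ b → (k : Int) ≤ countExponents y → best ≤ y) →
      IsFirstMax a b (altLoop a b best p hp) := by
  induction n with
  | zero =>
    intro a b best p k hp hpk hn hab hQ hleast
    rw [altLoop]
    have hret : leastMult a p > b := by
      by_contra hc
      have := leastMult_bound a b p (by omega) (by omega)
      omega
    rw [dif_pos hret]
    exact altLoop_ret a b best p k hpk hab hQ hleast hret
  | succ n ih =>
    intro a b best p k hp hpk hn hab hQ hleast
    rw [altLoop]
    by_cases hret : leastMult a p > b
    · rw [dif_pos hret]
      exact altLoop_ret a b best p k hpk hab hQ hleast hret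
    · rw [dif_neg hret]
      obtain ⟨hdvd, hne, hge, hlst⟩ := leastMult_spec a p (by omega)
      have hbnd := leastMult_bound a b p (by omega) (by omega)
      have hkey : ((k + 1 : Nat) : Int) ≤ countExponents (leastMult a p) := by
        exact (key_ge_iff _ (k + 1) (by omega)).mpr ⟨by rwa [← hpk], hne⟩
      exact ih a b (leastMult a p) (p * 2) (k + 1) (by omega)
        (by rw [hpk]; ring)
        (by omega) hab
        ⟨hge, by omega, hkey⟩
        (fun y h1 h2 hky =>
          hlst y (by rw [hpk]; exact ((key_ge_iff y (k + 1) (by omega)).mp hky).1)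
            ((key_ge_iff y (k + 1) (by omega)).mp hky).2 h1)

theorem B_isFirstMax (a b : Int) (hab : a ≤ b) : IsFirstMax a b (maxExponents_alt a b) := by
  unfold maxExponents_alt
  rw [if_neg (by omega)]
  exact altLoop_isFirstMax (2 * max b (-a) - 2).toNat a b a 2 0 (by norm_num)
    (by norm_num) (le_refl _) hab
    ⟨le_refl a, hab, by simpa using countExponents_nonneg a⟩
    (fun y h1 _ _ => h1)

-- ===== VERDICT (by name: the statement is the Claim_ definition above) =====
theorem maxExponents_spec : Claim_equal_maxExponents := by
  intro a b _ hpre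
  exact isFirstMax_unique (A_isFirstMax a b hpre) (B_isFirstMax a b hpre)
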